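-- pv_equiv track=rewrite | github.com/Yuongren/Phase-3-Week-1-Toy-Problems- | lib/num.py | two_are_positive
-- ===== SOURCE A (Python) =====
-- def two_are_positive(a, b, c):
--     if (c > 0 and b > 0 and a > 0):
--         return False
--     elif (a > 0 and b > 0) or (a > 0 and c > 0) or (c > 0 and b > 0):
--         return True
--     return False
--
--     result = two_are_positive(5, 6, -9)
--
--     print (result)
-- ===== SOURCE B (Python) =====
-- def two_are_positive(a, b, c):
--     return ((a > 0) + (b > 0) + (c > 0)) == 2
-- ===== Notes on version B (the rewrite author's own statement) =====
-- stated objective: simpler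
-- what changed: Replaces the all-three guard plus explicit pairwise OR of conjunctions by counting the positive arguments and comparing the count to 2.
import Mathlib
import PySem

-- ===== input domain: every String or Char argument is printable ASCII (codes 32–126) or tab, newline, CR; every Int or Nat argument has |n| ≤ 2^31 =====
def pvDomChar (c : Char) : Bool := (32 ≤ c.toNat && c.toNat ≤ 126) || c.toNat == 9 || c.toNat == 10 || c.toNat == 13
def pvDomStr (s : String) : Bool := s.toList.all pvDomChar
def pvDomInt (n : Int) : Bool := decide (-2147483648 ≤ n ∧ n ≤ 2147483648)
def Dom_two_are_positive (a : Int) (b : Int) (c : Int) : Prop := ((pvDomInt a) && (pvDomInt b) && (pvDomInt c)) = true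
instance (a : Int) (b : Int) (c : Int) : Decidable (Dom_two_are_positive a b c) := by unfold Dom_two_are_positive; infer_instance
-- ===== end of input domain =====

-- B replaces A's guard-plus-pairwise-OR boolean logic by counting positives and comparing to 2 (simpler).


-- ===== PORT A =====
def two_are_positive (a : Int) (b : Int) (c : Int) : Bool :=
  if 0 < c && 0 < b && 0 < a then false
  else if (0 < a && 0 < b) || (0 < a && 0 < c) || (0 < c && 0 < b) then true
  else false

-- ===== PORT B =====
def two_are_positive_alt (a : Int) (b : Int) (c : Int) : Bool :=
  ((if 0 < a then (1:Int) else 0) + (if 0 < b then 1 else 0) + (if 0 < c then 1 else 0)) == 2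

-- ===== PRECONDITION & SPEC =====
def Spec_two_are_positive (a : Int) (b : Int) (c : Int) (out : Bool) : Prop := out = two_are_positive_alt a b c
instance (a : Int) (b : Int) (c : Int) (out : Bool) : Decidable (Spec_two_are_positive a b c out) := by unfold Spec_two_are_positive; infer_instance

-- ===== CLAIM (what is proved, stated in full; the proofs are below) =====
def Claim_equal_two_are_positive : Prop := ∀ (a : Int) (b : Int) (c : Int), Dom_two_are_positive a b c → Spec_two_are_positive a b c (two_are_positive a b c)

-- ===== LEMMAS AND PROOFS =====

-- ===== VERDICT (by name: the statement is the Claim_ definition above) =====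
theorem two_are_positive_spec : Claim_equal_two_are_positive := by
  intro a b c _
  unfold Spec_two_are_positive two_are_positive two_are_positive_alt
  by_cases ha : 0 < a <;> by_cases hb : 0 < b <;> by_cases hc : 0 < c <;>
    simp [ha, hb, hc]
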